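-- pv_equiv track=rewrite | github.com/nurlan-maxsudov/PythonHomework | lesson-4/homework/loop3.py | insert_underscores
-- ===== SOURCE A (Python) =====
-- def insert_underscores(txt):
--     vowels = {'a', 'e', 'i', 'o', 'u'}
--     result = []
--     count = 0
--
--     for i, char in enumerate(txt):
--         result.append(char)
--         count += 1
--
--
--         if count % 3 == 0 and i != len(txt) - 1:
--             if char.lower() in vowels or (i > 0 and txt[i - 1] == '_'):
--                 continue
--             else:
--                 result.append('_')
--
--     return ''.join(result)
-- ===== SOURCE B (Python) =====
-- def insert_underscores(txt):
--     vowels = {'a', 'e', 'i', 'o', 'u'}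
--     n = len(txt)
--     parts = []
--     for j in range(0, n, 3):
--         chunk = txt[j:j+3]
--         parts.append(chunk)
--         if len(chunk) == 3 and j + 2 != n - 1:
--             if not (chunk[2].lower() in vowels or txt[j + 1] == '_'):
--                 parts.append('_')
--     return ''.join(parts)
-- ===== Notes on version B (the rewrite author's own statement) =====
-- stated objective: alternative
-- what changed: Replaces A's char-by-char loop with a running insert counter by a chunked pass: slice the text into 3-character chunks, append each chunk whole, decide the separator once per full chunk (reading the original string for the underscore-predecessor test), and join the pieces at the end.
import Mathlib
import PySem

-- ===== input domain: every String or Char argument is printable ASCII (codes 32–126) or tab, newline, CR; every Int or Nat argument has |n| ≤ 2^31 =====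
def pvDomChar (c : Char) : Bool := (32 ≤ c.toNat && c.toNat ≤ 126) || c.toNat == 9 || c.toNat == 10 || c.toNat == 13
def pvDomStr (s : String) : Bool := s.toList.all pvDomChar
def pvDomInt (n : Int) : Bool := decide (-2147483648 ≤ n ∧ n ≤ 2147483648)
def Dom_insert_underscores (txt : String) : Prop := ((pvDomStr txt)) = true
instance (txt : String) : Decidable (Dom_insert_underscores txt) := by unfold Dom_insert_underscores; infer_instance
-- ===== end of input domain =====

-- B replaces A's char-by-char counter loop by a chunked pass (slices of 3 joined at the end); alternative decomposition, same cost.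

-- ===== PORT A =====
-- loop body of A's for-loop (acc = (result, count), p = (i, char))
def pvStepA (cs : List Char) (n : Int) (acc : List Char × Int) (p : Int × Char) : List Char × Int :=
  let result := acc.1 ++ [p.2]
  let count := acc.2 + 1
  if PySem.Int.mod count 3 == 0 && p.1 != n - 1 then
    if PySem.Set.contains (PySem.Set.ofList ['a','e','i','o','u']) p.2.toLower
        || (decide (0 < p.1) && (PySem.List.pyGet? cs (p.1 - 1) == some '_')) then
      (result, count)
    else
      (result ++ ['_'], count)
  else
    (result, count)

def insert_underscores (txt : String) : String :=
  String.ofList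
    ((PySem.List.enumerate txt.toList 0).foldl
      (pvStepA txt.toList (txt.toList.length : Int)) ([], 0)).1

-- ===== PORT B =====
-- loop body of B's chunk loop (parts = accumulated pieces, j = chunk start)
def pvStepB (cs : List Char) (n : Int) (parts : List (List Char)) (j : Int) : List (List Char) :=
  let chunk := PySem.List.slice cs (some j) (some (j + 3))
  let parts := parts ++ [chunk]
  if chunk.length == 3 && j + 2 != n - 1 then
    if !(PySem.Set.contains (PySem.Set.ofList ['a','e','i','o','u']) (PySem.List.pyGetD chunk 2 ' ').toLower
          || (PySem.List.pyGetD cs (j + 1) ' ' == '_')) then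
      parts ++ [['_']]
    else parts
  else parts

def insert_underscores_alt (txt : String) : String :=
  String.ofList
    (PySem.Chars.join []
      ((PySem.List.pyRange 0 (txt.toList.length : Int) 3).foldl
        (pvStepB txt.toList (txt.toList.length : Int)) []))

-- ===== PRECONDITION & SPEC =====
def Spec_insert_underscores (txt : String) (out : String) : Prop := out = insert_underscores_alt txt
instance (txt : String) (out : String) : Decidable (Spec_insert_underscores txt out) := by unfold Spec_insert_underscores; infer_instance

-- ===== CLAIM (what is proved, stated in full; the proofs are below) =====
def Claim_equal_insert_underscores : Prop := ∀ (txt : String), Dom_insert_underscores txt → Spec_insert_underscores txt (insert_underscores txt)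

-- ===== LEMMAS AND PROOFS =====

-- what A's loop emits after the char at index i
def pvSepA (cs : List Char) (n : Int) (c : Char) (i : Int) : List Char :=
  if PySem.Int.mod (i + 1) 3 == 0 && i != n - 1 then
    if PySem.Set.contains (PySem.Set.ofList ['a','e','i','o','u']) c.toLower
        || (decide (0 < i) && (PySem.List.pyGet? cs (i - 1) == some '_')) then
      []
    else ['_']
  else []

-- A's whole production from position i on
def pvProdA (cs : List Char) (n : Int) : List Char → Int → List Char
  | [], _ => []
  | c :: l, i => c :: (pvSepA cs n c i ++ pvProdA cs n l (i + 1))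

-- B's whole production from chunk start j on
def pvProdB (n : Int) : List Char → Int → List Char
  | a :: b :: c :: rest, j =>
      a :: b :: c ::
        ((if (j + 2 != n - 1)
              && !(PySem.Set.contains (PySem.Set.ofList ['a','e','i','o','u']) c.toLower || (b == '_'))
          then ['_'] else []) ++ pvProdB n rest (j + 3))
  | rem, _ => rem

theorem pvJoin_eq_flatten (parts : List (List Char)) :
    PySem.Chars.join [] parts = parts.flatten := by
  unfold PySem.Chars.join
  induction parts with
  | nil => rfl
  | cons x t ih =>
      cases t with
      | nil => simp [List.intercalate]
      | cons y t' =>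
          simp only [List.intercalate] at ih ⊢
          simp [List.intersperse, List.flatten] at ih ⊢
          exact ih

theorem pvRange3_nil (a b : Int) (h : b ≤ a) : PySem.List.pyRange a b 3 = [] := by
  rw [PySem.List.pyRange_of_pos a b (by norm_num)]
  simp [show ¬ a < b by omega]

theorem pvRange3_cons (a b : Int) (h : a < b) :
    PySem.List.pyRange a b 3 = a :: PySem.List.pyRange (a + 3) b 3 := by
  rw [PySem.List.pyRange_of_pos a b (by norm_num),
      PySem.List.pyRange_of_pos (a + 3) b (by norm_num)]
  have h1 : ((b - a + 3 - 1) / 3).toNat = ((b - (a + 3) + 3 - 1) / 3).toNat + 1 := by omega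
  have h2 : (if a + 3 < b then ((b - (a + 3) + 3 - 1) / 3).toNat else 0)
      = ((b - (a + 3) + 3 - 1) / 3).toNat := by
    split
    · rfl
    · omega
  rw [if_pos h, h1, h2, List.range_succ_eq_map]
  simp only [List.map_cons, List.map_map]
  congr 1
  · push_cast; ring
  · apply List.map_congr_left
    intro k _
    simp only [Function.comp_apply]
    push_cast; ring

-- the branch shape shared by the two conditionals
theorem pvIfA (X V : Bool) :
    (if X = true then (if V = true then ([] : List Char) else ['_']) else [])
      = (if (X && !V) = true then ['_'] else []) := by
  cases X <;> cases V <;> simp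

theorem pvIfB (X V : Bool) (p : List (List Char)) :
    (if X = true then (if (!V) = true then p ++ [['_']] else p) else p)
      = p ++ (if (X && !V) = true then [['_']] else []) := by
  cases X <;> cases V <;> simp

theorem pvStepA_eq (cs : List Char) (n : Int) (res : List Char) (s : Int) (c : Char) :
    pvStepA cs n (res, s) (s, c) = (res ++ [c] ++ pvSepA cs n c s, s + 1) := by
  unfold pvStepA pvSepA
  split_ifs <;> simp_all [List.append_assoc] <;> tauto

theorem pvFoldA (cs : List Char) (n : Int) :
    ∀ (l : List Char) (s : Int) (res : List Char),
      (PySem.List.enumerate l s).foldl (pvStepA cs n) (res, s)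
        = (res ++ pvProdA cs n l s, s + l.length) := by
  intro l
  induction l with
  | nil => intro s res; simp [PySem.List.enumerate, pvProdA]
  | cons c l ih =>
      intro s res
      rw [PySem.List.enumerate_cons, List.foldl_cons, pvStepA_eq, ih (s + 1)]
      simp only [pvProdA, List.length_cons, Prod.mk.injEq]
      refine ⟨by simp [List.append_assoc], by push_cast; ring⟩

theorem pvDropGetD (cs : List Char) (k : Nat) (a b : Char) (t : List Char)
    (h : cs.drop k = a :: b :: t) : cs.getD (k + 1) ' ' = b := by
  have h1 : cs[k + 1]? = some b := by
    rw [← List.getElem?_drop, h]; rfl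
  simp [List.getD_eq_getElem?_getD, h1]

theorem pvDropDrop (cs : List Char) (j : Int) (hj : 0 ≤ j) (a b c : Char) (rest : List Char)
    (h : cs.drop j.toNat = a :: b :: c :: rest) : cs.drop (j + 3).toNat = rest := by
  have h3 : (j + 3).toNat = j.toNat + 3 := by omega
  rw [h3, ← List.drop_drop, h]
  rfl

theorem pvFoldB (cs : List Char) :
    ∀ (m : Nat) (j : Int) (parts : List (List Char)), 0 ≤ j → cs.length ≤ j.toNat + m →
      (((PySem.List.pyRange j (cs.length : Int) 3).foldl (pvStepB cs (cs.length : Int)) parts)).flatten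
        = parts.flatten ++ pvProdB (cs.length : Int) (cs.drop j.toNat) j := by
  intro m
  induction m with
  | zero =>
      intro j parts hj hm
      have hge : (cs.length : Int) ≤ j := by omega
      rw [pvRange3_nil _ _ hge, List.drop_eq_nil_of_le (by omega)]
      simp [pvProdB]
  | succ m ih =>
      intro j parts hj hm
      by_cases hlt : j < (cs.length : Int)
      · rw [pvRange3_cons _ _ hlt, List.foldl_cons]
        have hchunk : PySem.List.slice cs (some j) (some (j + 3))
            = (cs.drop j.toNat).take 3 := by
          rw [PySem.List.slice_toNat cs hj (by omega)]
          congr 1; omega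
        have hlen : j.toNat < cs.length := by omega
        rcases hrem : cs.drop j.toNat with _ | ⟨a, _ | ⟨b, _ | ⟨c, rest⟩⟩⟩
        · exfalso
          have h0 := List.length_drop (l := cs) (i := j.toNat)
          rw [hrem] at h0; simp at h0; omega
        · have hlast : cs.length = j.toNat + 1 := by
            have h0 := List.length_drop (l := cs) (i := j.toNat)
            rw [hrem] at h0; simp at h0; omega
          have hstep : pvStepB cs (cs.length : Int) parts j = parts ++ [[a]] := by
            unfold pvStepB
            rw [hchunk, hrem]
            simp
          rw [hstep, pvRange3_nil _ _ (by omega)]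
          simp [pvProdB]
        · have hlast : cs.length = j.toNat + 2 := by
            have h0 := List.length_drop (l := cs) (i := j.toNat)
            rw [hrem] at h0; simp at h0; omega
          have hstep : pvStepB cs (cs.length : Int) parts j = parts ++ [[a, b]] := by
            unfold pvStepB
            rw [hchunk, hrem]
            simp
          rw [hstep, pvRange3_nil _ _ (by omega)]
          simp [pvProdB]
        · -- full chunk
          have hb : PySem.List.pyGetD cs (j + 1) ' ' = b := by
            rw [PySem.List.pyGetD_of_nonneg cs ' ' (by omega)]
            have h2 : (j + 1).toNat = j.toNat + 1 := by omega
            rw [h2, pvDropGetD cs j.toNat a b (c :: rest) hrem]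
          have hstep : pvStepB cs (cs.length : Int) parts j
              = parts ++ [[a, b, c]]
                ++ (if ((j + 2 != (cs.length : Int) - 1)
                      && !(PySem.Set.contains (PySem.Set.ofList ['a','e','i','o','u']) c.toLower
                            || (b == '_'))) = true
                    then [['_']] else []) := by
            unfold pvStepB
            rw [hchunk, hrem]
            simp only [List.take_succ_cons, List.take_zero, hb]
            rw [show PySem.List.pyGetD [a, b, c] (2 : Int) ' ' = c from rfl]
            simp only [List.length_cons, List.length_nil, Nat.zero_add, Nat.reduceAdd,
              beq_self_eq_true, Bool.true_and]
            exact pvIfB _ _ _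
          have hdrop3 := pvDropDrop cs j hj a b c rest hrem
          rw [hstep, ih (j + 3) _ (by omega) (by omega), hdrop3]
          simp only [pvProdB]
          simp [List.append_assoc]
          try split_ifs <;> rfl
      · have hge : (cs.length : Int) ≤ j := by omega
        rw [pvRange3_nil _ _ hge, List.drop_eq_nil_of_le (by omega)]
        simp [pvProdB]

theorem pvSepA_ne (cs : List Char) (n : Int) (c : Char) (i : Int)
    (h : ¬ (3 : Int) ∣ (i + 1)) : pvSepA cs n c i = [] := by
  unfold pvSepA
  simp [h]

theorem pvAB (cs : List Char) :
    ∀ (m : Nat) (rem : List Char) (j : Int), rem.length ≤ m → 0 ≤ j → (3 : Int) ∣ j →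
      cs.drop j.toNat = rem →
      pvProdA cs (cs.length : Int) rem j = pvProdB (cs.length : Int) rem j := by
  intro m
  induction m with
  | zero =>
      intro rem j hm _ _ _
      have h0 : rem = [] := by
        cases rem with
        | nil => rfl
        | cons x t => simp at hm
      subst h0
      simp [pvProdA, pvProdB]
  | succ m ih =>
      intro rem j hm hj hdvd hdrop
      have hmod1 : ¬ (3 : Int) ∣ (j + 1) := by omega
      have hmod2 : ¬ (3 : Int) ∣ (j + 1 + 1) := by omega
      have hmod3 : PySem.Int.mod (j + 2 + 1) 3 = 0 := by
        rw [PySem.Int.mod_eq_emod_of_pos (by norm_num)]; omega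
      rcases rem with _ | ⟨a, _ | ⟨b, _ | ⟨c, rest⟩⟩⟩
      · simp [pvProdA, pvProdB]
      · simp [pvProdA, pvProdB, pvSepA_ne _ _ _ _ hmod1]
      · simp [pvProdA, pvProdB, pvSepA_ne _ _ _ _ hmod1, pvSepA_ne _ _ _ _ hmod2]
      · have hb : PySem.List.pyGet? cs (j + 2 - 1) = some b := by
          have h1 : j + 2 - 1 = j + 1 := by ring
          rw [h1, PySem.List.pyGet?_of_nonneg cs (by omega)]
          have h2 : (j + 1).toNat = j.toNat + 1 := by omega
          rw [h2, ← List.getElem?_drop, hdrop]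
          rfl
        have hsep3 : pvSepA cs (cs.length : Int) c (j + 2)
            = (if ((j + 2 != (cs.length : Int) - 1)
                  && !(PySem.Set.contains (PySem.Set.ofList ['a','e','i','o','u']) c.toLower
                        || (b == '_'))) = true
                then ['_'] else []) := by
          unfold pvSepA
          rw [hb, hmod3, decide_eq_true (show (0 : Int) < j + 2 by omega)]
          rw [show ((some b == some '_') : Bool) = (b == '_') from rfl]
          simp only [beq_self_eq_true, Bool.true_and]
          exact pvIfA _ _
        have hdrop3 := pvDropDrop cs j hj a b c rest hdrop
        have hIH := ih rest (j + 3) (by simp at hm; omega) (by omega)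
          (by obtain ⟨k, hk⟩ := hdvd; exact ⟨k + 1, by omega⟩) hdrop3
        simp only [pvProdA, pvProdB, pvSepA_ne _ _ _ _ hmod1, pvSepA_ne _ _ _ _ hmod2,
          List.nil_append]
        rw [show j + 1 + 1 = j + 2 from by ring]
        rw [show j + 2 + 1 = j + 3 from by ring]
        rw [hsep3, hIH]

-- ===== VERDICT (by name: the statement is the Claim_ definition above) =====
theorem insert_underscores_spec : Claim_equal_insert_underscores := by
  intro txt _
  unfold Spec_insert_underscores insert_underscores insert_underscores_alt
  rw [pvFoldA txt.toList (txt.toList.length : Int) txt.toList 0 [],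
      pvJoin_eq_flatten,
      pvFoldB txt.toList txt.toList.length 0 [] (by norm_num) (by simp)]
  simp only [List.nil_append, List.flatten_nil, Int.toNat_zero, List.drop_zero]
  rw [pvAB txt.toList txt.toList.length txt.toList 0 (le_refl _) (by norm_num)
      ⟨0, by ring⟩ (by simp)]
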